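-- pv_equiv track=rewrite | github.com/Alpha-Leporis/code | questions/HR/calculate_counters_arr.py | calculate_counters
-- ===== SOURCE A (Python) =====
-- def calculate_counters(arr):
--     n = len(arr)
--     counters = [0] * n  # Initialize counters array with zeros
--
--     for i in range(n):
--         # Initialize counter for each element
--         counter = 0
--         # Compare the current element with elements to its left
--         for j in range(i):
--             diff = abs(arr[i] - arr[j])
--             if arr[i] > arr[j]:
--                 counter += diff
--             else:
--                 counter -= diff
--         # Store the counter value for the current element
--         counters[i] = counter
--
--     return counters
-- ===== SOURCE B (Python) =====
-- def calculate_counters(arr):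
--     # O(n): for each i, counter = i*arr[i] - sum(arr[:i]), via a running prefix sum.
--     res = []
--     prefix = 0
--     for i, x in enumerate(arr):
--         res.append(i * x - prefix)
--         prefix += x
--     return res
-- ===== Notes on version B (the rewrite author's own statement) =====
-- stated objective: faster
-- what changed: Replaced the quadratic nested scan (signed absolute differences with every earlier element) by the algebraically equal closed form i*arr[i] - prefix_sum(i), computed in one pass with a running prefix sum.
import Mathlib
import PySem

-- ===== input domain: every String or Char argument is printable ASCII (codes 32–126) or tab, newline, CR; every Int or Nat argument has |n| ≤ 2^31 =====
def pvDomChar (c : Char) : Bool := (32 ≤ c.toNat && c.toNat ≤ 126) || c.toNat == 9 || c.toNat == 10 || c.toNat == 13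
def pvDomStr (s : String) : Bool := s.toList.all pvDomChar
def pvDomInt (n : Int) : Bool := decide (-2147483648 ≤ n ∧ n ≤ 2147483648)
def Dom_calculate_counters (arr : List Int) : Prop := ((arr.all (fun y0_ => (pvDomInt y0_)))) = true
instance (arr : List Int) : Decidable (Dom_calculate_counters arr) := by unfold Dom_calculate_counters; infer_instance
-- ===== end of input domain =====

-- B replaces A's quadratic nested scan by the equal closed form i*arr[i] - prefix_sum(i) in one pass (objective: faster, asymptotic).

-- ===== PORT A =====
-- literal port: for i in range(n), inner loop over j in range(i) accumulating ±abs(arr[i]-arr[j])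
def calculate_counters (arr : List Int) : List Int :=
  (PySem.List.pyRange 0 (arr.length : Int) 1).map (fun i =>
    (PySem.List.pyRange 0 i 1).foldl (fun counter j =>
      let ai := PySem.List.pyGetD arr i 0
      let aj := PySem.List.pyGetD arr j 0
      let diff := |ai - aj|
      if ai > aj then counter + diff else counter - diff) 0)

-- ===== PORT B =====
-- one pass: res.append(i*x - prefix); prefix += x
def pvAltGo (arr : List Int) (i pre : Int) : List Int :=
  match arr with
  | [] => []
  | x :: xs => (i * x - pre) :: pvAltGo xs (i + 1) (pre + x)

def calculate_counters_alt (arr : List Int) : List Int := pvAltGo arr 0 0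

-- ===== PRECONDITION & SPEC =====
def Spec_calculate_counters (arr : List Int) (out : List Int) : Prop := out = calculate_counters_alt arr
instance (arr : List Int) (out : List Int) : Decidable (Spec_calculate_counters arr out) := by unfold Spec_calculate_counters; infer_instance

-- ===== CLAIM (what is proved, stated in full; the proofs are below) =====
def Claim_equal_calculate_counters : Prop := ∀ (arr : List Int), Dom_calculate_counters arr → Spec_calculate_counters arr (calculate_counters arr)

-- ===== LEMMAS AND PROOFS =====

-- every inner-loop step adds ai - aj regardless of branch; the fold is m*a - sum(arr[:m])
theorem pv_inner_fold (arr : List Int) (a : Int) (m : Nat) (hm : m ≤ arr.length) :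
    (PySem.List.pyRange 0 (m : Int) 1).foldl (fun counter j =>
      let aj := PySem.List.pyGetD arr j 0
      let diff := |a - aj|
      if a > aj then counter + diff else counter - diff) 0
    = m * a - (arr.take m).sum := by
  induction m with
  | zero =>
    rw [PySem.List.pyRange_one_eq_nil (by omega)]
    simp
  | succ m ih =>
    have hm' : m ≤ arr.length := Nat.le_of_succ_le hm
    have hmlt : m < arr.length := hm
    have hcast : ((m + 1 : Nat) : Int) = (m : Int) + 1 := by push_cast; ring
    rw [hcast, PySem.List.pyRange_one_succ_right (by omega), List.foldl_append, ih hm']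
    have hget : PySem.List.pyGetD arr (m : Int) 0 = arr[m] := by
      simp [PySem.List.pyGetD, List.getElem?_eq_getElem hmlt]
    have hsum : (arr.take (m + 1)).sum = (arr.take m).sum + arr[m] :=
      List.sum_take_succ arr m hmlt
    simp only [List.foldl_cons, List.foldl_nil, hget, hsum]
    rcases lt_trichotomy arr[m] a with h | h | h
    · rw [if_pos h, abs_of_pos (by omega)]; ring
    · rw [if_neg (by omega), abs_of_nonpos (by omega)]; ring
    · rw [if_neg (by omega), abs_of_neg (by omega)]; ring

theorem pv_altGo_eq (arr : List Int) (i p : Int) :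
    pvAltGo arr i p =
      (List.range arr.length).map (fun k => (i + k) * arr.getD k 0 - (p + (arr.take k).sum)) := by
  induction arr generalizing i p with
  | nil => simp [pvAltGo]
  | cons x xs ih =>
    rw [pvAltGo, List.length_cons, List.range_succ_eq_map, List.map_cons, List.map_map, ih (i + 1) (p + x)]
    refine congrArg₂ List.cons (by push_cast; ring_nf; simp) ?_
    apply List.map_congr_left
    intro k _
    simp only [Function.comp, List.getD_cons_succ, List.take_succ_cons, List.sum_cons]
    push_cast
    ring

-- ===== VERDICT (by name: the statement is the Claim_ definition above) =====
theorem calculate_counters_spec : Claim_equal_calculate_counters := by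
  intro arr _
  unfold Spec_calculate_counters calculate_counters calculate_counters_alt
  rw [pv_altGo_eq, PySem.List.pyRange_one]
  simp only [sub_zero, Int.toNat_natCast, List.map_map]
  apply List.map_congr_left
  intro i hi
  have hilt : i < arr.length := List.mem_range.mp hi
  have hgi : PySem.List.pyGetD arr (i : Int) 0 = arr[i] := by
    simp [PySem.List.pyGetD, List.getElem?_eq_getElem hilt]
  simp only [Function.comp, zero_add, hgi]
  rw [pv_inner_fold arr arr[i] i (Nat.le_of_lt hilt)]
  simp [List.getD_eq_getElem?_getD, List.getElem?_eq_getElem hilt]
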